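-- pv_equiv track=rewrite | github.com/Innovation-Advisory-Consulting/docs-gen | scripts/generate_docs.py | expand_doc_sets
-- ===== SOURCE A (Python) =====
-- DOC_SETS = {
--     "core": "core-solution,core-architecture,core-diagrams,core-components,core-dataflow,core-deployment,core-repo,core-build,core-dependencies,core-modules",
--     "ai": "ai-overview,ai-prompts,ai-guardrails,ai-testing,ai-hitl,ai-ops,ai-privacy",
--     "api": "api-reference,api-integration,api-auth,api-contracts",
--     "data": "data-schema,data-dictionary,data-logging,data-pipeline,data-retention",
--     "security": "security-overview,security-threat,security-risk,security-secrets,security-vuln,security-incident,security-compliance",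
--     "operations": "ops-runbook,ops-monitoring,ops-backup,ops-release,ops-support,ops-capacity",
--     "engineering": "eng-onboarding,eng-workflow,eng-review,eng-standards,eng-dod,eng-change",
--     "customer": "customer-solution,customer-architecture,customer-integration,customer-security,customer-ops,customer-requirements",
--     "business": "business-brief,business-roi,business-status,business-risk,business-roadmap,business-faq,business-marketing",
-- }
--
-- def expand_doc_sets(doc_set_str: str) -> list[str]:
--     """Expand preset names and return list of individual doc keys."""
--     keys = []
--     for item in doc_set_str.split(","):
--         item = item.strip()
--         if item in DOC_SETS:
--             # Recursively expand presets
--             keys.extend(expand_doc_sets(DOC_SETS[item]))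
--         else:
--             keys.append(item)
--     return keys
-- ===== SOURCE B (Python) =====
-- DOC_SETS = {
--     "core": "core-solution,core-architecture,core-diagrams,core-components,core-dataflow,core-deployment,core-repo,core-build,core-dependencies,core-modules",
--     "ai": "ai-overview,ai-prompts,ai-guardrails,ai-testing,ai-hitl,ai-ops,ai-privacy",
--     "api": "api-reference,api-integration,api-auth,api-contracts",
--     "data": "data-schema,data-dictionary,data-logging,data-pipeline,data-retention",
--     "security": "security-overview,security-threat,security-risk,security-secrets,security-vuln,security-incident,security-compliance",
--     "operations": "ops-runbook,ops-monitoring,ops-backup,ops-release,ops-support,ops-capacity",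
--     "engineering": "eng-onboarding,eng-workflow,eng-review,eng-standards,eng-dod,eng-change",
--     "customer": "customer-solution,customer-architecture,customer-integration,customer-security,customer-ops,customer-requirements",
--     "business": "business-brief,business-roi,business-status,business-risk,business-roadmap,business-faq,business-marketing",
-- }
--
-- def expand_doc_sets(doc_set_str: str) -> list[str]:
--     """Expand preset names iteratively with an explicit worklist (no recursion)."""
--     keys = []
--     worklist = doc_set_str.split(",")
--     while worklist:
--         item = worklist.pop(0).strip()
--         if item in DOC_SETS:
--             worklist = DOC_SETS[item].split(",") + worklist
--         else:
--             keys.append(item)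
--     return keys
-- ===== Notes on version B (the rewrite author's own statement) =====
-- stated objective: alternative
-- what changed: Replaces A's recursion (recursive call on each preset's value string) by a single iterative worklist loop that pops one token at a time and pushes a preset's split value back onto the front of the worklist.
import Mathlib
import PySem

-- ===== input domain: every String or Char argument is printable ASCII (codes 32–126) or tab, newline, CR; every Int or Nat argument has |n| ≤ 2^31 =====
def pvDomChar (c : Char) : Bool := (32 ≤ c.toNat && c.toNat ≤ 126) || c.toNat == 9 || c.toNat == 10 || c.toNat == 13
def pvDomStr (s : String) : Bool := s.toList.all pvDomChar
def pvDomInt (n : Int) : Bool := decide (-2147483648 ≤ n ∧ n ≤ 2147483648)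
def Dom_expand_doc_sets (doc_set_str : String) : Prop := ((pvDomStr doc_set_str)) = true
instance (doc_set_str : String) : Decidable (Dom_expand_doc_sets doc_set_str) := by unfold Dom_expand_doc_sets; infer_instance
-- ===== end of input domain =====

-- ===== PORT A =====
-- B re-implements A's recursive preset expansion as an iterative worklist loop (objective: alternative decomposition).
-- DOC_SETS, the module-level preset table of Source A, as an association list (insertion order).
def pvDOC_SETS : PySem.Dict String String := PySem.Dict.mk [
  ("core", "core-solution,core-architecture,core-diagrams,core-components,core-dataflow,core-deployment,core-repo,core-build,core-dependencies,core-modules"),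
  ("ai", "ai-overview,ai-prompts,ai-guardrails,ai-testing,ai-hitl,ai-ops,ai-privacy"),
  ("api", "api-reference,api-integration,api-auth,api-contracts"),
  ("data", "data-schema,data-dictionary,data-logging,data-pipeline,data-retention"),
  ("security", "security-overview,security-threat,security-risk,security-secrets,security-vuln,security-incident,security-compliance"),
  ("operations", "ops-runbook,ops-monitoring,ops-backup,ops-release,ops-support,ops-capacity"),
  ("engineering", "eng-onboarding,eng-workflow,eng-review,eng-standards,eng-dod,eng-change"),
  ("customer", "customer-solution,customer-architecture,customer-integration,customer-security,customer-ops,customer-requirements"),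
  ("business", "business-brief,business-roi,business-status,business-risk,business-roadmap,business-faq,business-marketing")]

-- s.split(","): split? is none only for an empty separator, so getD [] is a pure totality guard.
def pvSplit (s : String) : List String := (PySem.Str.split? s ",").getD []

-- A's recursion, with a fuel counter as totality guard only: no DOC_SETS value contains a
-- DOC_SETS key, so fuel 2 is never exhausted on any input (depth-1 recursion at most).
def pvExpandA : Nat → String → List String
  | 0, _ => []
  | f + 1, s =>
    (pvSplit s).foldl (fun keys item =>
      let item := PySem.Str.strip item
      match pvDOC_SETS.get? item with
      | some v => keys ++ pvExpandA f v
      | none => keys ++ [item]) []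

def expand_doc_sets (doc_set_str : String) : List String := pvExpandA 2 doc_set_str

-- ===== PORT B =====
-- B's while-loop over the worklist; the fuel is a totality guard only: each popped preset
-- pushes at most 10 leaf tokens (which pop without pushing), so 11*n+1 steps always suffice.
def pvExpandB : Nat → List String → List String → List String
  | 0, _, keys => keys
  | _ + 1, [], keys => keys
  | f + 1, item :: rest, keys =>
    let item := PySem.Str.strip item
    match pvDOC_SETS.get? item with
    | some v => pvExpandB f (pvSplit v ++ rest) keys
    | none => pvExpandB f rest (keys ++ [item])

def expand_doc_sets_alt (doc_set_str : String) : List String :=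
  let worklist := pvSplit doc_set_str
  pvExpandB (11 * worklist.length + 1) worklist []
-- ===== PRECONDITION & SPEC =====
def Spec_expand_doc_sets (doc_set_str : String) (out : List String) : Prop := out = expand_doc_sets_alt doc_set_str
instance (doc_set_str : String) (out : List String) : Decidable (Spec_expand_doc_sets doc_set_str out) := by unfold Spec_expand_doc_sets; infer_instance

-- ===== CLAIM (what is proved, stated in full; the proofs are below) =====
def Claim_equal_expand_doc_sets : Prop := ∀ (doc_set_str : String), Dom_expand_doc_sets doc_set_str → Spec_expand_doc_sets doc_set_str (expand_doc_sets doc_set_str)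

-- ===== LEMMAS AND PROOFS =====

-- What both programs compute: each comma token, stripped, is either looked up or kept.
def pvG (item : String) : List String :=
  match pvDOC_SETS.get? (PySem.Str.strip item) with
  | some v => pvSplit v
  | none => [PySem.Str.strip item]

-- A token is a "leaf" if stripping fixes it and it is not a preset name.
def pvLeaf (t : String) : Bool := (PySem.Str.strip t == t) && !(pvDOC_SETS.contains t)

-- Every DOC_SETS value splits into at most 10 leaf tokens (checked by computation).
set_option maxRecDepth 100000 in
set_option maxHeartbeats 2000000 in
theorem pvValuesLeaf : ∀ v ∈ pvDOC_SETS.values,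
    (pvSplit v).all pvLeaf = true ∧ (pvSplit v).length ≤ 10 := by decide

theorem pvGet?_mem_values {k v : String} (h : pvDOC_SETS.get? k = some v) :
    v ∈ pvDOC_SETS.values := by
  simp only [pvDOC_SETS, PySem.Dict.get?_mk_cons] at h
  split_ifs at h <;>
    first
    | (injection h with h; subst h; simp [pvDOC_SETS, PySem.Dict.values])
    | simp [PySem.Dict.get?] at h

theorem pvLeaf_get? {t : String} (h : pvLeaf t = true) :
    PySem.Str.strip t = t ∧ pvDOC_SETS.get? t = none := by
  simp only [pvLeaf, Bool.and_eq_true, beq_iff_eq, Bool.not_eq_true'] at h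
  exact ⟨h.1, by simpa [PySem.Dict.contains_eq_isSome_get?, Option.isSome_eq_false_iff,
    Option.isNone_iff_eq_none] using h.2⟩

-- pvG on a leaf token is the singleton.
theorem pvG_leaf {t : String} (h : pvLeaf t = true) : pvG t = [t] := by
  obtain ⟨h1, h2⟩ := pvLeaf_get? h
  simp [pvG, h1, h2]

-- Fuel-1 A on a DOC_SETS value is just its token list.
theorem pvExpandA_one_leaf (v : String) (hv : (pvSplit v).all pvLeaf = true) :
    pvExpandA 1 v = pvSplit v := by
  show (pvSplit v).foldl _ [] = _
  rw [PySem.List.foldl_congr_mem (g := fun keys item => keys ++ [item])]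
  · exact PySem.List.foldl_append_singleton_eq_self ..
  · intro keys t ht
    obtain ⟨h1, h2⟩ := pvLeaf_get? (List.all_eq_true.mp hv t ht)
    simp [h1, h2]

theorem pvExpandA_two (s : String) : pvExpandA 2 s = (pvSplit s).flatMap pvG := by
  show (pvSplit s).foldl _ [] = _
  rw [PySem.List.foldl_congr_mem (g := fun keys item => keys ++ pvG item)]
  · exact PySem.List.foldl_append_eq_flatMap ..
  · intro keys t _
    simp only [pvG]
    cases h : pvDOC_SETS.get? (PySem.Str.strip t) with
    | none => rfl
    | some v =>
      dsimp only
      rw [pvExpandA_one_leaf v (pvValuesLeaf v (pvGet?_mem_values h)).1]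

-- Weight of a token: the number of loop steps B spends on it (itself plus what it pushes).
def pvWeight (t : String) : Nat :=
  match pvDOC_SETS.get? (PySem.Str.strip t) with
  | some v => 1 + (pvSplit v).length
  | none => 1

def pvMeasure (ws : List String) : Nat := (ws.map pvWeight).sum

theorem pvMeasure_cons (t : String) (rest : List String) :
    pvMeasure (t :: rest) = pvWeight t + pvMeasure rest := by simp [pvMeasure]

theorem pvMeasure_append (a b : List String) :
    pvMeasure (a ++ b) = pvMeasure a + pvMeasure b := by simp [pvMeasure]

theorem pvWeight_of_some {t v : String} (h : pvDOC_SETS.get? (PySem.Str.strip t) = some v) :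
    pvWeight t = 1 + (pvSplit v).length := by unfold pvWeight; rw [h]

theorem pvWeight_of_none {t : String} (h : pvDOC_SETS.get? (PySem.Str.strip t) = none) :
    pvWeight t = 1 := by unfold pvWeight; rw [h]

theorem pvWeight_pos (t : String) : 1 ≤ pvWeight t := by
  cases h : pvDOC_SETS.get? (PySem.Str.strip t) with
  | none => rw [pvWeight_of_none h]
  | some v => rw [pvWeight_of_some h]; omega

theorem pvWeight_le (t : String) : pvWeight t ≤ 11 := by
  cases h : pvDOC_SETS.get? (PySem.Str.strip t) with
  | none => rw [pvWeight_of_none h]; omega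
  | some v =>
    rw [pvWeight_of_some h]
    have := (pvValuesLeaf v (pvGet?_mem_values h)).2
    omega

theorem pvMeasure_le_mul (ws : List String) : pvMeasure ws ≤ 11 * ws.length := by
  induction ws with
  | nil => simp [pvMeasure]
  | cons t rest ih =>
    have := pvWeight_le t
    simp only [pvMeasure, List.map_cons, List.sum_cons, List.length_cons] at *
    omega

theorem pvWeight_leaf {t : String} (h : pvLeaf t = true) : pvWeight t = 1 := by
  obtain ⟨h1, h2⟩ := pvLeaf_get? h
  apply pvWeight_of_none
  rw [h1]
  exact h2

theorem pvMeasure_leaves {ls : List String} (h : ls.all pvLeaf = true) :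
    pvMeasure ls = ls.length := by
  induction ls with
  | nil => rfl
  | cons t ls ih =>
    simp only [List.all_cons, Bool.and_eq_true] at h
    rw [pvMeasure_cons, pvWeight_leaf h.1, ih h.2, List.length_cons]
    omega

theorem pvFlatMap_leaves {ls : List String} (h : ls.all pvLeaf = true) :
    ls.flatMap pvG = ls := by
  induction ls with
  | nil => rfl
  | cons t ls ih =>
    simp only [List.all_cons, Bool.and_eq_true] at h
    simp [List.flatMap_cons, pvG_leaf h.1, ih h.2]

-- B's loop invariant: with enough fuel the loop returns keys ++ flatMap pvG over the worklist.
theorem pvExpandB_spec : ∀ (fuel : Nat) (ws keys : List String),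
    pvMeasure ws ≤ fuel → pvExpandB fuel ws keys = keys ++ ws.flatMap pvG := by
  intro fuel
  induction fuel with
  | zero =>
    intro ws keys h
    cases ws with
    | nil => simp [pvExpandB]
    | cons t rest =>
      exfalso
      rw [pvMeasure_cons] at h
      have := pvWeight_pos t
      omega
  | succ f ih =>
    intro ws keys h
    cases ws with
    | nil => simp [pvExpandB]
    | cons t rest =>
      simp only [pvExpandB]
      cases hg : pvDOC_SETS.get? (PySem.Str.strip t) with
      | some v =>
        have hlv := (pvValuesLeaf v (pvGet?_mem_values hg)).1
        have hm : pvMeasure (pvSplit v ++ rest) ≤ f := by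
          rw [pvMeasure_append, pvMeasure_leaves hlv]
          rw [pvMeasure_cons, pvWeight_of_some hg] at h
          omega
        dsimp only
        rw [ih _ _ hm, List.flatMap_append, pvFlatMap_leaves hlv,
          List.flatMap_cons]
        simp [pvG, hg]
      | none =>
        have hm : pvMeasure rest ≤ f := by
          rw [pvMeasure_cons, pvWeight_of_none hg] at h
          omega
        dsimp only
        rw [ih _ _ hm, List.flatMap_cons]
        simp [pvG, hg]

-- ===== VERDICT (by name: the statement is the Claim_ definition above) =====
theorem expand_doc_sets_spec : Claim_equal_expand_doc_sets := by
  intro s _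
  show expand_doc_sets s = expand_doc_sets_alt s
  rw [expand_doc_sets, expand_doc_sets_alt, pvExpandA_two,
    pvExpandB_spec _ _ _ (le_trans (pvMeasure_le_mul (pvSplit s)) (by omega))]
  simp
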